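-- pv_equiv track=rewrite | github.com/tammet/nlpsolver | llmpipe/nlpconvcollected.py | fix_internal
-- ===== SOURCE A (Python) =====
-- def fix_internal(s):
--   inquotes=False
--   opens=0
--   for i in range(0,len(s)):
--     c=s[i]
--     if c=='"' and inquotes:
--       inquotes=False
--       continue
--     elif c=='"' and not inquotes:
--       inquotes=True
--       continue
--     if inquotes: continue
--     if c=="[":
--       opens=opens+1
--     elif c=="]":
--       opens=opens-1
--       if opens==0:
--         if i<len(s)-1 and s[i+1:].strip():
--           ns=s[:i]+s[i+1:]
--           ns=fix_internal(ns)
--           return ns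
--   return s
-- ===== SOURCE B (Python) =====
-- def fix_internal(s):
--   body = s.rstrip()
--   tail = s[len(body):]
--   out = []
--   inquotes = False
--   depth = 0
--   n = len(body)
--   for i in range(n):
--     c = body[i]
--     if c == '"':
--       inquotes = not inquotes
--     elif not inquotes:
--       if c == "[":
--         depth += 1
--       elif c == "]":
--         if depth == 1 and i < n - 1:
--           continue
--         depth -= 1
--     out.append(c)
--   return "".join(out) + tail
-- ===== Notes on version B (the rewrite author's own statement) =====
-- stated objective: alternative
-- what changed: A restarts a full recursive rescan of the whole string after every single bracket removal; B splits off the all-whitespace tail once and does one left-to-right pass that drops each closing bracket reaching depth 0 (outside quotes, with content after it) while keeping the running quote/depth state.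
import Mathlib
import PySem

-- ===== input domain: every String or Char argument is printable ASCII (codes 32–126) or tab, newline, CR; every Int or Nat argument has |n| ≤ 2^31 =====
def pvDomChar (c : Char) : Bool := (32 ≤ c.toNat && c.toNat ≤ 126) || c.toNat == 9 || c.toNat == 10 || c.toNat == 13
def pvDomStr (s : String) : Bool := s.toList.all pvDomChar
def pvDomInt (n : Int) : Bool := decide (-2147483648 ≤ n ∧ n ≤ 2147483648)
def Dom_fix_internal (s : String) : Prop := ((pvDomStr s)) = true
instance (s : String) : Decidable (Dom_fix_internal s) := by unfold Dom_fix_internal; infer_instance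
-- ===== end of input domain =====

-- B replaces A's recursive restart after each removal by a single left-to-right pass
-- keeping the running quote/depth state (alternative single-pass algorithm).

-- ===== PORT A =====
-- the for-loop of A: scan s from index i with state (inquotes, opens); returns the index
-- at which A performs its removal-and-recurse (`return ns`), or none if the loop finishes
def fixScan : List Char → Nat → Bool → Int → Option Nat
  | [], _, _, _ => none
  | c :: t, i, inq, opens =>
    if c = '"' then
      if inq then fixScan t (i + 1) false opens
      else fixScan t (i + 1) true opens
    else if inq then fixScan t (i + 1) inq opens
    else if c = '[' then fixScan t (i + 1) inq (opens + 1)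
    else if c = ']' then
      -- opens == 0 after the decrement; i < len(s)-1 is t ≠ []; s[i+1:] is t
      if opens - 1 = 0 ∧ t ≠ [] ∧ PySem.Chars.strip t ≠ [] then some i
      else fixScan t (i + 1) inq (opens - 1)
    else fixScan t (i + 1) inq opens

theorem fixScan_some_bounds {t : List Char} {i : Nat} {inq : Bool} {d : Int} {j : Nat}
    (h : fixScan t i inq d = some j) : i ≤ j ∧ j < i + t.length := by
  induction t generalizing i inq d with
  | nil => simp [fixScan] at h
  | cons c t ih =>
    rw [fixScan] at h
    split_ifs at h <;>
      first
        | (obtain ⟨h1, h2⟩ := ih h; simp; omega)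
        | (cases h; simp)

def fixCore (l : List Char) : List Char :=
  match h : fixScan l 0 false 0 with
  | some i => fixCore (l.take i ++ l.drop (i + 1))   -- ns = s[:i] + s[i+1:]; ns = fix_internal(ns)
  | none => l
termination_by l.length
decreasing_by
  have := fixScan_some_bounds h
  simp; omega

def fix_internal (s : String) : String := String.ofList (fixCore s.toList)

-- ===== PORT B =====
-- Source B's single loop over body = s.rstrip(), recursing on the list: `i < n - 1` is `t ≠ []`
def altLoop : Bool → Int → List Char → List Char
  | _, _, [] => []
  | inq, depth, c :: t =>
    if c = '"' then c :: altLoop (!inq) depth t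
    else if inq then c :: altLoop inq depth t
    else if c = '[' then c :: altLoop inq (depth + 1) t
    else if c = ']' then
      if depth = 1 ∧ t ≠ [] then altLoop inq depth t   -- `continue`: drop this ']'
      else c :: altLoop inq (depth - 1) t
    else c :: altLoop inq depth t

def fix_internal_alt (s : String) : String :=
  let body := PySem.Chars.rstrip s.toList
  String.ofList (altLoop false 0 body ++ s.toList.drop body.length)

-- ===== PRECONDITION & SPEC =====
def Spec_fix_internal (s : String) (out : String) : Prop := out = fix_internal_alt s
instance (s : String) (out : String) : Decidable (Spec_fix_internal s out) := by unfold Spec_fix_internal; infer_instance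

-- ===== CLAIM (what is proved, stated in full; the proofs are below) =====
def Claim_equal_fix_internal : Prop := ∀ (s : String), Dom_fix_internal s → Spec_fix_internal s (fix_internal s)

-- ===== LEMMAS AND PROOFS =====

-- the last character (if any) is not whitespace
def NoWsLast (b : List Char) : Prop := ∀ c ∈ b.getLast?, PySem.Chars.isspace c = false

theorem strip_eq_nil_iff (x : List Char) :
    PySem.Chars.strip x = [] ↔ ∀ c ∈ x, PySem.Chars.isspace c = true := by
  have hr : ∀ y : List Char, PySem.Chars.rstrip y = [] ↔ ∀ c ∈ y, PySem.Chars.isspace c = true := by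
    intro y
    simp [PySem.Chars.rstrip, List.dropWhile_eq_nil_iff]
  rw [PySem.Chars.strip, hr]
  have hl : PySem.Chars.lstrip x = List.dropWhile PySem.Chars.isspace x := by
    simp [PySem.Chars.lstrip]
  rw [hl]
  constructor
  · intro h c hc
    rcases List.mem_append.mp
        ((List.takeWhile_append_dropWhile (p := PySem.Chars.isspace) (l := x)) ▸ hc) with h' | h'
    · exact List.mem_takeWhile_imp h'
    · exact h c h'
  · intro h c hc
    exact h c ((List.dropWhile_sublist (p := PySem.Chars.isspace)).mem hc)

theorem condA_iff {t w : List Char} (hw : ∀ c ∈ w, PySem.Chars.isspace c = true)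
    (hb : NoWsLast t) :
    ((t ++ w ≠ [] ∧ PySem.Chars.strip (t ++ w) ≠ []) ↔ t ≠ []) := by
  constructor
  · rintro ⟨h1, h2⟩ rfl
    exact h2 ((strip_eq_nil_iff w).mpr hw)
  · intro ht
    refine ⟨by simp [ht], fun hs => ?_⟩
    have hlast := List.getLast_mem ht
    have hns := hb _ (by rw [List.getLast?_eq_some_getLast ht]; rfl)
    have := (strip_eq_nil_iff (t ++ w)).mp hs (t.getLast ht) (List.mem_append_left _ hlast)
    simp [hns] at this

theorem wsNone {w : List Char} (hw : ∀ c ∈ w, PySem.Chars.isspace c = true)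
    (i : Nat) (inq : Bool) (d : Int) : fixScan w i inq d = none := by
  induction w generalizing i inq d with
  | nil => rfl
  | cons c t ih =>
    have hc : PySem.Chars.isspace c = true := hw c (List.mem_cons_self)
    have h1 : c ≠ '"' := by rintro rfl; exact absurd hc (by decide)
    have h2 : c ≠ '[' := by rintro rfl; exact absurd hc (by decide)
    have h3 : c ≠ ']' := by rintro rfl; exact absurd hc (by decide)
    have hw' : ∀ c ∈ t, PySem.Chars.isspace c = true := fun c hc => hw c (List.mem_cons_of_mem _ hc)
    rw [fixScan]
    simp only [h1, h2, h3, if_false]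
    split_ifs <;> exact ih hw' _ _ _

theorem noWsLast_tail {c : Char} {t : List Char} (h : NoWsLast (c :: t)) : NoWsLast t := by
  cases t with
  | nil => intro c hc; simp at hc
  | cons d t' => intro x hx; exact h x (by rwa [List.getLast?_cons_cons])

theorem scan_none_id {w : List Char} (hw : ∀ c ∈ w, PySem.Chars.isspace c = true) :
    ∀ t : List Char, ∀ i inq d, NoWsLast t →
      fixScan (t ++ w) i inq d = none → altLoop inq d t = t := by
  intro t
  induction t with
  | nil => intro i inq d _ _; rfl
  | cons c t ih =>
    intro i inq d hg h
    rw [List.cons_append, fixScan] at h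
    rw [altLoop]
    have hg' := noWsLast_tail hg
    by_cases h1 : c = '"'
    · rw [if_pos h1] at h
      rw [if_pos h1]
      cases inq
      · simp only [Bool.false_eq_true, if_false] at h
        simp only [Bool.not_false]
        exact congrArg _ (ih _ _ _ hg' h)
      · simp only [if_true] at h
        simp only [Bool.not_true]
        exact congrArg _ (ih _ _ _ hg' h)
    · rw [if_neg h1] at h
      rw [if_neg h1]
      by_cases h2 : inq = true
      · rw [if_pos h2] at h; rw [if_pos h2]
        exact congrArg _ (ih _ _ _ hg' h)
      · rw [if_neg h2] at h; rw [if_neg h2]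
        by_cases h3 : c = '['
        · rw [if_pos h3] at h; rw [if_pos h3]
          exact congrArg _ (ih _ _ _ hg' h)
        · rw [if_neg h3] at h; rw [if_neg h3]
          by_cases h4 : c = ']'
          · rw [if_pos h4] at h; rw [if_pos h4]
            by_cases h5 : d - 1 = 0 ∧ t ++ w ≠ [] ∧ PySem.Chars.strip (t ++ w) ≠ []
            · rw [if_pos h5] at h; exact absurd h (by simp)
            · rw [if_neg h5] at h
              have h6 : ¬ (d = 1 ∧ t ≠ []) := fun hx =>
                h5 ⟨by omega, (condA_iff hw hg').mpr hx.2⟩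
              rw [if_neg h6]
              exact congrArg _ (ih _ _ _ hg' h)
          · rw [if_neg h4] at h; rw [if_neg h4]
            exact congrArg _ (ih _ _ _ hg' h)

theorem scan_some_erase {w : List Char} (hw : ∀ c ∈ w, PySem.Chars.isspace c = true) :
    ∀ t : List Char, ∀ i inq d j, NoWsLast t →
      fixScan (t ++ w) i inq d = some j →
      i ≤ j ∧ j + 1 < i + t.length ∧ altLoop inq d t = altLoop inq d (t.eraseIdx (j - i)) := by
  intro t
  induction t with
  | nil =>
    intro i inq d j hg h
    rw [List.nil_append, wsNone hw] at h
    cases h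
  | cons c t ih =>
    intro i inq d j hg h
    rw [List.cons_append, fixScan] at h
    have hg' := noWsLast_tail hg
    by_cases h1 : c = '"'
    · rw [if_pos h1] at h
      cases inq
      · simp only [Bool.false_eq_true, if_false] at h
        obtain ⟨ha, hb2, hc⟩ := ih _ _ _ _ hg' h
        refine ⟨by omega, by simp; omega, ?_⟩
        rw [show j - i = (j - (i + 1)) + 1 by omega, List.eraseIdx_cons_succ,
          altLoop, altLoop, if_pos h1, if_pos h1]
        simp only [Bool.not_false]
        exact congrArg _ hc
      · simp only [if_true] at h
        obtain ⟨ha, hb2, hc⟩ := ih _ _ _ _ hg' h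
        refine ⟨by omega, by simp; omega, ?_⟩
        rw [show j - i = (j - (i + 1)) + 1 by omega, List.eraseIdx_cons_succ,
          altLoop, altLoop, if_pos h1, if_pos h1]
        simp only [Bool.not_true]
        exact congrArg _ hc
    · rw [if_neg h1] at h
      by_cases h2 : inq = true
      · rw [if_pos h2] at h
        obtain ⟨ha, hb2, hc⟩ := ih _ _ _ _ hg' h
        refine ⟨by omega, by simp; omega, ?_⟩
        rw [show j - i = (j - (i + 1)) + 1 by omega, List.eraseIdx_cons_succ,
          altLoop, altLoop, if_neg h1, if_neg h1, if_pos h2, if_pos h2]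
        exact congrArg _ hc
      · rw [if_neg h2] at h
        by_cases h3 : c = '['
        · rw [if_pos h3] at h
          obtain ⟨ha, hb2, hc⟩ := ih _ _ _ _ hg' h
          refine ⟨by omega, by simp; omega, ?_⟩
          rw [show j - i = (j - (i + 1)) + 1 by omega, List.eraseIdx_cons_succ,
            altLoop, altLoop, if_neg h1, if_neg h1, if_neg h2, if_neg h2, if_pos h3, if_pos h3]
          exact congrArg _ hc
        · rw [if_neg h3] at h
          by_cases h4 : c = ']'
          · rw [if_pos h4] at h
            by_cases h5 : d - 1 = 0 ∧ t ++ w ≠ [] ∧ PySem.Chars.strip (t ++ w) ≠ []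
            · rw [if_pos h5] at h
              cases h
              obtain ⟨hd0, hrest⟩ := h5
              have ht : t ≠ [] := (condA_iff hw hg').mp hrest
              refine ⟨le_refl _, by simp [List.length_pos_iff.mpr ht], ?_⟩
              rw [Nat.sub_self, List.eraseIdx_cons_zero]
              conv_lhs => rw [altLoop]
              rw [if_neg h1, if_neg h2, if_neg h3, if_pos h4,
                if_pos (show d = 1 ∧ t ≠ [] from ⟨by omega, ht⟩)]
            · rw [if_neg h5] at h
              obtain ⟨ha, hb2, hc⟩ := ih _ _ _ _ hg' h
              have ht : t ≠ [] := by
                cases t with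
                | nil => simp at hb2; omega
                | cons x xs => simp
              have hd1 : ¬ d = 1 := fun hd => h5 ⟨by omega, (condA_iff hw hg').mpr ht⟩
              refine ⟨by omega, by simp; omega, ?_⟩
              rw [show j - i = (j - (i + 1)) + 1 by omega, List.eraseIdx_cons_succ,
                altLoop, altLoop, if_neg h1, if_neg h1, if_neg h2, if_neg h2, if_neg h3,
                if_neg h3, if_pos h4, if_pos h4,
                if_neg (fun hx => hd1 hx.1), if_neg (fun hx : d = 1 ∧ _ => hd1 hx.1)]
              exact congrArg _ hc
          · rw [if_neg h4] at h
            obtain ⟨ha, hb2, hc⟩ := ih _ _ _ _ hg' h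
            refine ⟨by omega, by simp; omega, ?_⟩
            rw [show j - i = (j - (i + 1)) + 1 by omega, List.eraseIdx_cons_succ,
              altLoop, altLoop, if_neg h1, if_neg h1, if_neg h2, if_neg h2, if_neg h3,
              if_neg h3, if_neg h4, if_neg h4]
            exact congrArg _ hc

theorem fixCore_none {l : List Char} (h : fixScan l 0 false 0 = none) : fixCore l = l := by
  rw [fixCore]
  split <;> simp_all

theorem fixCore_some {l : List Char} {i : Nat} (h : fixScan l 0 false 0 = some i) :
    fixCore l = fixCore (l.take i ++ l.drop (i + 1)) := by
  rw [fixCore]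
  split <;> simp_all

theorem noWsLast_eraseIdx {b : List Char} {j : Nat} (hj : j + 1 < b.length)
    (hb : NoWsLast b) : NoWsLast (b.eraseIdx j) := by
  intro c hc
  apply hb
  rwa [List.eraseIdx_eq_take_drop_succ,
    List.getLast?_append_of_ne_nil _ (by simp [List.drop_eq_nil_iff]; omega),
    List.getLast?_drop, if_neg (by omega)] at hc

theorem main_equiv : ∀ n : Nat, ∀ l b w : List Char, l.length ≤ n → l = b ++ w →
    (∀ c ∈ w, PySem.Chars.isspace c = true) → NoWsLast b →
    fixCore l = altLoop false 0 b ++ w := by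
  intro n
  induction n with
  | zero =>
    intro l b w hlen hl hw hb
    subst hl
    rw [List.length_append] at hlen
    obtain ⟨rfl, rfl⟩ : b = [] ∧ w = [] := by
      constructor <;> (apply List.eq_nil_of_length_eq_zero; omega)
    rw [List.nil_append, fixCore_none rfl]
    rfl
  | succ m ih =>
    intro l b w hlen hl hw hb
    subst hl
    cases hscan : fixScan (b ++ w) 0 false 0 with
    | none =>
      rw [fixCore_none hscan, scan_none_id hw b 0 false 0 hb hscan]
    | some j =>
      obtain ⟨hj0, hjlen, halt⟩ := scan_some_erase hw b 0 false 0 j hb hscan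
      rw [Nat.sub_zero] at halt
      have herase : (b ++ w).take j ++ (b ++ w).drop (j + 1) = b.eraseIdx j ++ w := by
        rw [← List.eraseIdx_eq_take_drop_succ,
          List.eraseIdx_append_of_lt_length (by omega) w]
      rw [fixCore_some hscan, herase,
        ih _ _ _ (by
          rw [List.length_append, List.length_eraseIdx, if_pos (by omega)]
          rw [List.length_append] at hlen
          omega) rfl hw
          (noWsLast_eraseIdx (by omega) hb), ← halt]

theorem reverse_split (l : List Char) :
    l = (List.dropWhile PySem.Chars.isspace l.reverse).reverse ++
        (List.takeWhile PySem.Chars.isspace l.reverse).reverse := by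
  conv_lhs => rw [← List.reverse_reverse l,
    ← List.takeWhile_append_dropWhile (p := PySem.Chars.isspace) (l := l.reverse)]
  rw [List.reverse_append]

theorem drop_rstrip_eq (l : List Char) :
    l.drop (PySem.Chars.rstrip l).length =
      (List.takeWhile PySem.Chars.isspace l.reverse).reverse := by
  have key := reverse_split l
  rw [PySem.Chars.rstrip]
  set A := (List.dropWhile PySem.Chars.isspace l.reverse).reverse with hA
  set B := (List.takeWhile PySem.Chars.isspace l.reverse).reverse with hB
  rw [key, List.drop_left]

theorem rstrip_decomp (l : List Char) :
    PySem.Chars.rstrip l ++ l.drop (PySem.Chars.rstrip l).length = l := by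
  rw [drop_rstrip_eq, PySem.Chars.rstrip, ← List.reverse_append,
    List.takeWhile_append_dropWhile, List.reverse_reverse]

theorem ws_drop_rstrip (l : List Char) :
    ∀ c ∈ l.drop (PySem.Chars.rstrip l).length, PySem.Chars.isspace c = true := by
  intro c hc
  rw [drop_rstrip_eq, List.mem_reverse] at hc
  exact List.mem_takeWhile_imp hc

theorem noWsLast_rstrip (l : List Char) : NoWsLast (PySem.Chars.rstrip l) := by
  intro c hc
  rw [PySem.Chars.rstrip, List.getLast?_reverse] at hc
  cases hD : List.dropWhile PySem.Chars.isspace l.reverse with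
  | nil => rw [hD] at hc; simp at hc
  | cons x xs =>
    rw [hD] at hc
    simp only [List.head?_cons, Option.mem_def, Option.some.injEq] at hc
    subst hc
    have hne : List.dropWhile PySem.Chars.isspace l.reverse ≠ [] := by rw [hD]; simp
    have := List.head_dropWhile_not PySem.Chars.isspace hne
    simp only [hD, List.head_cons] at this
    exact this

-- ===== VERDICT (by name: the statement is the Claim_ definition above) =====
theorem fix_internal_spec : Claim_equal_fix_internal := by
  intro s _
  unfold Spec_fix_internal fix_internal fix_internal_alt
  exact main_equiv (s.toList.length) s.toList (PySem.Chars.rstrip s.toList)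
      (s.toList.drop (PySem.Chars.rstrip s.toList).length) (le_refl _)
      (rstrip_decomp s.toList).symm (ws_drop_rstrip s.toList)
      (noWsLast_rstrip s.toList) ▸ rfl
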